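-- pv_equiv track=rewrite | github.com/scheelelab/MultiPep | extract_data_and_bin_up2.py | find_overlapping_items
-- ===== SOURCE A (Python) =====
-- def find_overlapping_items(dct):
--     new_dct = {}
--     for k,v in dct.items():
--         tmp_dct = {}
--         for kk,vv in dct.items():
--             if k != kk:
--                 inter = len(set(v).intersection(set(vv)))
--                 if inter > 0:
--                     tmp_dct[kk] = inter
--         new_dct[k] = tmp_dct
--     return new_dct
-- ===== SOURCE B (Python) =====
-- def find_overlapping_items(dct):
--     def merge_count(a, b):
--         n = i = j = 0
--         while i < len(a) and j < len(b):
--             if a[i] < b[j]: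
--                 i += 1
--             elif b[j] < a[i]:
--                 j += 1
--             else:
--                 n += 1
--                 i += 1
--                 j += 1
--         return n
--
--     svals = [(k, sorted(set(v))) for k, v in dct.items()]
--     return {k: {kk: n for kk, b in svals
--                 if kk != k and (n := merge_count(a, b)) > 0}
--             for k, a in svals}
-- ===== Notes on version B (the rewrite author's own statement) =====
-- stated objective: alternative
-- what changed: B deduplicates and sorts each value list once up front and computes every pairwise overlap size with a two-pointer merge over the two sorted lists, instead of rebuilding hash sets and intersecting them inside the quadratic pair loop as A does.
import Mathlib
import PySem

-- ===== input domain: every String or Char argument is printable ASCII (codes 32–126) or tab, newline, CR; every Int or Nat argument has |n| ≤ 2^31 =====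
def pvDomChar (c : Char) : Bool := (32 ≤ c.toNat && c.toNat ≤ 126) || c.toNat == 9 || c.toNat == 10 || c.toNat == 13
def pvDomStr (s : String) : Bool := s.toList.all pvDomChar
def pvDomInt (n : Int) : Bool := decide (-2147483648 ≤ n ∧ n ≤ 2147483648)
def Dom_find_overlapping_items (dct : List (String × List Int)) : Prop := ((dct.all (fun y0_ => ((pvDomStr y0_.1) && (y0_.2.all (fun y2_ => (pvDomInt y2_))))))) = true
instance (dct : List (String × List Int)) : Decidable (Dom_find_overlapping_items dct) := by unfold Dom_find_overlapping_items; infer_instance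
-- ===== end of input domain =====

-- B deduplicates and sorts each value list once and computes each pairwise overlap size by a
-- two-pointer merge of the two sorted lists, instead of rebuilding hash sets and intersecting
-- them inside the quadratic pair loop (objective: alternative algorithm, similar cost).

-- ===== PORT A =====
def find_overlapping_items (dct : List (String × List Int)) : List (String × List (String × Int)) :=
  let items := (PySem.Dict.ofList dct).items
  let new_dct := items.foldl (fun (nd : PySem.Dict String (PySem.Dict String Int)) kv =>
      let tmp_dct := items.foldl (fun (td : PySem.Dict String Int) q =>
          if kv.1 ≠ q.1 then
            let inter : Int := PySem.Set.len (PySem.Set.inter (PySem.Set.ofList kv.2) (PySem.Set.ofList q.2))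
            if inter > 0 then td.insert q.1 inter else td
          else td) PySem.Dict.empty
      nd.insert kv.1 tmp_dct) PySem.Dict.empty
  new_dct.items.map (fun p => (p.1, p.2.items))

-- ===== PORT B =====
-- B's helper: the two-pointer while loop over the two sorted lists, as structural recursion.
def mergeCountB : List Int → List Int → Int
  | x :: a, y :: b =>
    if x < y then mergeCountB a (y :: b)
    else if y < x then mergeCountB (x :: a) b
    else 1 + mergeCountB a b
  | _, _ => 0
termination_by a b => a.length + b.length
decreasing_by all_goals (simp only [List.length_cons]; omega)

def find_overlapping_items_alt (dct : List (String × List Int)) : List (String × List (String × Int)) :=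
  let svals := (PySem.Dict.ofList dct).items.map
      (fun kv => (kv.1, PySem.List.sorted (PySem.Set.ofList kv.2) (fun x => x)))
  let out := PySem.Dict.ofList (svals.map (fun p =>
      (p.1, PySem.Dict.ofList (svals.filterMap (fun q =>
          if q.1 ≠ p.1 then
            let n := mergeCountB p.2 q.2
            if n > 0 then some (q.1, n) else none
          else none)))))
  out.items.map (fun p => (p.1, p.2.items))

-- ===== PRECONDITION & SPEC =====
def Spec_find_overlapping_items (dct : List (String × List Int)) (out : List (String × List (String × Int))) : Prop := out = find_overlapping_items_alt dct
instance (dct : List (String × List Int)) (out : List (String × List (String × Int))) : Decidable (Spec_find_overlapping_items dct out) := by unfold Spec_find_overlapping_items; infer_instance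

-- ===== CLAIM (what is proved, stated in full; the proofs are below) =====
def Claim_equal_find_overlapping_items : Prop := ∀ (dct : List (String × List Int)), Dom_find_overlapping_items dct → Spec_find_overlapping_items dct (find_overlapping_items dct)

-- ===== LEMMAS AND PROOFS =====

-- a dict built from pairs with pairwise-distinct keys has exactly those pairs as items
theorem items_ofList_nodup {ν : Type} (ps : List (String × ν)) (h : (ps.map Prod.fst).Nodup) :
    (PySem.Dict.ofList ps).items = ps := by
  have := PySem.Dict.items_foldl_insert_fresh ps Prod.fst Prod.snd PySem.Dict.empty
    (by intro a _; simp [PySem.Dict.contains_empty]) h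
  simpa [PySem.Dict.ofList, PySem.Dict.update, PySem.Dict.empty] using this

-- 'if c then some (f x) else none' comprehension = filter-then-map
theorem filterMap_ite_eq {α β : Type} (c : α → Bool) (f : α → β) (l : List α) :
    l.filterMap (fun x => if c x then some (f x) else none) = (l.filter c).map f := by
  induction l with
  | nil => rfl
  | cons x t ih => by_cases hx : c x <;> simp [hx, ih]

-- membership-count congruence for two lists with the same members on l
theorem countP_mem_iff {l b c : List Int} (h : ∀ z ∈ l, z ∈ b ↔ z ∈ c) :
    l.countP (fun z => decide (z ∈ b)) = l.countP (fun z => decide (z ∈ c)) :=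
  List.countP_congr (fun z hz => by simp only [decide_eq_true_eq]; exact h z hz)

-- two-pointer merge on strictly increasing lists counts the common elements
theorem mergeCountB_eq_countP (a b : List Int)
    (ha : a.Pairwise (· < ·)) (hb : b.Pairwise (· < ·)) :
    mergeCountB a b = (a.countP (fun x => decide (x ∈ b)) : Int) := by
  induction a, b using mergeCountB.induct with
  | case1 x a y b hxy ih =>
    have hxy' : ¬x = y := by omega
    have hxb : x ∉ b := by
      intro h; have := (List.pairwise_cons.mp hb).1 x h; omega
    rw [mergeCountB]
    simp only [if_pos hxy]
    rw [ih ha.of_cons hb]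
    simp [hxy', hxb]
  | case2 x a y b hxy hyx ih =>
    have hcong : ∀ z ∈ x :: a, z ∈ b ↔ z ∈ y :: b := by
      intro z hz
      have hyz : y < z := by
        rcases List.mem_cons.mp hz with h | h
        · omega
        · have := (List.pairwise_cons.mp ha).1 z h; omega
      simp only [List.mem_cons]
      constructor
      · intro h; exact Or.inr h
      · rintro (h | h); · omega
        · exact h
    rw [mergeCountB]
    simp only [if_neg hxy, if_pos hyx]
    rw [ih ha hb.of_cons, countP_mem_iff hcong]
  | case3 x a y b hxy hyx ih =>
    have hxey : x = y := by omega
    have hxa : ∀ z ∈ a, z ∈ y :: b ↔ z ∈ b := by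
      intro z hz
      have : x < z := (List.pairwise_cons.mp ha).1 z hz
      simp only [List.mem_cons]
      constructor
      · rintro (h | h); · omega
        · exact h
      · intro h; exact Or.inr h
    rw [mergeCountB]
    simp only [if_neg hxy, if_neg hyx]
    rw [ih ha.of_cons hb.of_cons]
    have hx : x ∈ y :: b := by simp [hxey]
    have hsplit : (x :: a).countP (fun z => decide (z ∈ y :: b))
        = a.countP (fun z => decide (z ∈ b)) + 1 := by
      rw [List.countP_cons, countP_mem_iff hxa]
      simp [hx]
    rw [hsplit]
    push_cast
    omega
  | case4 a b h =>
    rcases a with _ | ⟨x, a⟩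
    · simp [mergeCountB]
    · rcases b with _ | ⟨y, b⟩
      · simp [mergeCountB]
      · exact (h x a y b rfl rfl).elim

-- per-pair core: the merge count over sorted deduplicated lists IS A's intersection size
theorem merge_eq_inter (v w : List Int) :
    mergeCountB (PySem.List.sorted (PySem.Set.ofList v) (fun x => x))
                (PySem.List.sorted (PySem.Set.ofList w) (fun x => x))
      = PySem.Set.len (PySem.Set.inter (PySem.Set.ofList v) (PySem.Set.ofList w)) := by
  rw [mergeCountB_eq_countP _ _ (PySem.List.sorted_ofList_pairwise_lt v)
        (PySem.List.sorted_ofList_pairwise_lt w)]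
  have h1 : ∀ z ∈ PySem.List.sorted (PySem.Set.ofList v) (fun x => x),
      (decide (z ∈ PySem.List.sorted (PySem.Set.ofList w) (fun x => x)) = true)
        ↔ ((PySem.Set.ofList w).contains z = true) := by
    intro z _
    rw [decide_eq_true_eq, PySem.List.mem_sorted, ← PySem.Set.contains_iff]
  rw [List.countP_congr h1]
  rw [(PySem.List.sorted_perm (PySem.Set.ofList v) (fun x => x) false).countP_eq]
  simp only [PySem.Set.len, PySem.Set.inter]
  rw [List.countP_eq_length_filter]

-- A's inner loop: conditional dict inserts over fresh distinct keys = filter-then-map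
theorem A_inner_items (I : List (String × List Int)) (kv : String × List Int)
    (hnd : (I.map Prod.fst).Nodup) :
    (I.foldl (fun (td : PySem.Dict String Int) q =>
        if kv.1 ≠ q.1 then
          if PySem.Set.len (PySem.Set.inter (PySem.Set.ofList kv.2) (PySem.Set.ofList q.2)) > 0 then
            td.insert q.1 (PySem.Set.len (PySem.Set.inter (PySem.Set.ofList kv.2) (PySem.Set.ofList q.2)))
          else td
        else td) PySem.Dict.empty).items
      = (I.filter (fun q => decide (kv.1 ≠ q.1) &&
            decide (0 < PySem.Set.len (PySem.Set.inter (PySem.Set.ofList kv.2) (PySem.Set.ofList q.2))))).map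
          (fun q => (q.1, PySem.Set.len (PySem.Set.inter (PySem.Set.ofList kv.2) (PySem.Set.ofList q.2)))) := by
  have hcong : (fun (td : PySem.Dict String Int) (q : String × List Int) =>
      (if kv.1 ≠ q.1 then
         if PySem.Set.len (PySem.Set.inter (PySem.Set.ofList kv.2) (PySem.Set.ofList q.2)) > 0 then
           td.insert q.1 (PySem.Set.len (PySem.Set.inter (PySem.Set.ofList kv.2) (PySem.Set.ofList q.2)))
         else td
       else td))
      = (fun (td : PySem.Dict String Int) (q : String × List Int) =>
         if (decide (kv.1 ≠ q.1) &&
             decide (0 < PySem.Set.len (PySem.Set.inter (PySem.Set.ofList kv.2) (PySem.Set.ofList q.2)))) = true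
         then td.insert q.1 (PySem.Set.len (PySem.Set.inter (PySem.Set.ofList kv.2) (PySem.Set.ofList q.2)))
         else td) := by
    funext td q
    by_cases h1 : kv.1 ≠ q.1
    · simp [h1]
    · simp [h1]  -- h2 may be unused in some branches
  rw [hcong]
  rw [PySem.List.foldl_if_eq_foldl_filter]
  rw [PySem.Dict.items_foldl_insert_fresh _ Prod.fst
        (fun q => PySem.Set.len (PySem.Set.inter (PySem.Set.ofList kv.2) (PySem.Set.ofList q.2)))
        PySem.Dict.empty
        (by intro a _; simp [PySem.Dict.contains_empty])
        (hnd.sublist ((List.filter_sublist (l := I)).map Prod.fst))]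
  simp [PySem.Dict.empty]

-- B's inner comprehension: dict of filtered pairs over distinct keys = filter-then-map
theorem B_inner_items (svals : List (String × List Int)) (pk : String) (pv : List Int)
    (hnd : (svals.map Prod.fst).Nodup) :
    (PySem.Dict.ofList (svals.filterMap (fun q =>
        if q.1 ≠ pk then
          if mergeCountB pv q.2 > 0 then some (q.1, mergeCountB pv q.2) else none
        else none))).items
      = (svals.filter (fun q => decide (q.1 ≠ pk) && decide (0 < mergeCountB pv q.2))).map
          (fun q => (q.1, mergeCountB pv q.2)) := by
  have hfun : (fun (q : String × List Int) =>
      if q.1 ≠ pk then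
        if mergeCountB pv q.2 > 0 then some (q.1, mergeCountB pv q.2) else none
      else none)
      = (fun (q : String × List Int) =>
         if (decide (q.1 ≠ pk) && decide (0 < mergeCountB pv q.2))
         then some (q.1, mergeCountB pv q.2) else none) := by
    funext q
    by_cases h1 : q.1 ≠ pk
    · simp [h1]
    · simp [h1]
  rw [hfun, filterMap_ite_eq]
  apply items_ofList_nodup
  have hmm : ((svals.filter (fun q => decide (q.1 ≠ pk) && decide (0 < mergeCountB pv q.2))).map
      (fun q => (q.1, mergeCountB pv q.2))).map Prod.fst
      = (svals.filter (fun q => decide (q.1 ≠ pk) && decide (0 < mergeCountB pv q.2))).map Prod.fst := by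
    simp [List.map_map, Function.comp_def]
  rw [hmm]
  exact hnd.sublist ((List.filter_sublist (l := svals)).map Prod.fst)

-- items of the empty dict (used to clear the fold's seed)
theorem items_empty_eq {κ ν : Type} [BEq κ] : (PySem.Dict.empty : PySem.Dict κ ν).items = [] := rfl

-- ===== MAIN PROOF =====
theorem ports_agree (dct : List (String × List Int)) :
    find_overlapping_items dct = find_overlapping_items_alt dct := by
  simp only [find_overlapping_items, find_overlapping_items_alt]
  have hnd : (((PySem.Dict.ofList dct).items).map Prod.fst).Nodup := by
    have h := PySem.Dict.nodup_keys_ofList dct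
    simpa [PySem.Dict.keys] using h
  set I := (PySem.Dict.ofList dct).items with hI
  rw [PySem.Dict.items_foldl_insert_fresh I Prod.fst
        (fun kv => List.foldl
          (fun (td : PySem.Dict String Int) q =>
            if kv.1 ≠ q.1 then
              if ((PySem.Set.ofList kv.2).inter (PySem.Set.ofList q.2)).len > 0 then
                td.insert q.1 ((PySem.Set.ofList kv.2).inter (PySem.Set.ofList q.2)).len
              else td
            else td)
          PySem.Dict.empty I)
        PySem.Dict.empty (fun a _ => PySem.Dict.contains_empty _) hnd]
  rw [items_ofList_nodup _ (by simpa [List.map_map, Function.comp_def] using hnd)]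
  simp only [items_empty_eq, List.nil_append, List.map_map]
  apply List.map_congr_left
  intro kv hkv
  simp only [Function.comp_apply]
  refine congrArg (Prod.mk kv.1) ?_
  rw [A_inner_items I kv hnd]
  rw [B_inner_items _ kv.1 (PySem.List.sorted (PySem.Set.ofList kv.2) (fun x => x)) (by simpa [List.map_map, Function.comp_def] using hnd)]
  rw [List.filter_map, List.map_map]
  have hpred : ((fun (q : String × List Int) =>
      decide (q.1 ≠ kv.1) &&
        decide (0 < mergeCountB (PySem.List.sorted (PySem.Set.ofList kv.2) (fun x => x)) q.2)) ∘
      (fun (kv : String × List Int) => (kv.1, PySem.List.sorted (PySem.Set.ofList kv.2) (fun x => x))))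
      = (fun (q : String × List Int) => decide (kv.1 ≠ q.1) &&
          decide (0 < ((PySem.Set.ofList kv.2).inter (PySem.Set.ofList q.2)).len)) := by
    funext q
    simp only [Function.comp_apply]
    rw [merge_eq_inter kv.2 q.2]
    rw [show (decide (q.1 ≠ kv.1)) = decide (kv.1 ≠ q.1) from decide_eq_decide.mpr ne_comm]
  have hval : ((fun (q : String × List Int) =>
      (q.1, mergeCountB (PySem.List.sorted (PySem.Set.ofList kv.2) (fun x => x)) q.2)) ∘
      (fun (kv : String × List Int) => (kv.1, PySem.List.sorted (PySem.Set.ofList kv.2) (fun x => x))))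
      = (fun (q : String × List Int) => (q.1, ((PySem.Set.ofList kv.2).inter (PySem.Set.ofList q.2)).len)) := by
    funext q
    simp only [Function.comp_apply]
    rw [merge_eq_inter kv.2 q.2]
  rw [hpred, hval]

-- ===== VERDICT (by name: the statement is the Claim_ definition above) =====
theorem find_overlapping_items_spec : Claim_equal_find_overlapping_items := by
  intro dct _hdom
  unfold Spec_find_overlapping_items
  exact ports_agree dct
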